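-- pv_equiv track=rewrite | github.com/Netts-official/tron_address_generator | app/pattern_matcher.py | check_sequential_digits
-- ===== SOURCE A (Python) =====
-- from typing import List, Dict, Tuple, Optional
--
-- def check_sequential_digits(address: str, min_length: int = 5) -> List[Tuple[str, int, int]]:
--     """Проверяет наличие последовательных цифр"""
--     results = []
--
--     # Проверяем возрастающие последовательности
--     for i in range(len(address) - min_length + 1):
--         segment = address[i:i+min_length]
--         if segment.isdigit():
--             is_sequential = True
--             for j in range(1, len(segment)):
--                 if int(segment[j]) != int(segment[j-1]) + 1:
--                     is_sequential = False
--                     break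
--             if is_sequential:
--                 results.append((segment, i, i+min_length))
--
--     # Проверяем убывающие последовательности
--     for i in range(len(address) - min_length + 1):
--         segment = address[i:i+min_length]
--         if segment.isdigit():
--             is_sequential = True
--             for j in range(1, len(segment)):
--                 if int(segment[j]) != int(segment[j-1]) - 1:
--                     is_sequential = False
--                     break
--             if is_sequential:
--                 results.append((segment, i, i+min_length))
--
--     return results
-- ===== SOURCE B (Python) =====
-- def check_sequential_digits(address, min_length=5):
--     """One pass: run lengths of +1/-1 digit chains starting at each index, then O(1) per window."""
--     if min_length < 1:
--         return []
--     n = len(address)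
--     m = min_length
--     asc = [0] * (n + 1)
--     desc = [0] * (n + 1)
--     for i in range(n - 1, -1, -1):
--         c = address[i]
--         if c.isdigit():
--             asc[i] = 1
--             desc[i] = 1
--             if i + 1 < n and address[i + 1].isdigit():
--                 d = ord(address[i + 1]) - ord(c)
--                 if d == 1:
--                     asc[i] = asc[i + 1] + 1
--                 if d == -1:
--                     desc[i] = desc[i + 1] + 1
--     out = [(address[i:i + m], i, i + m) for i in range(n - m + 1) if asc[i] >= m]
--     out += [(address[i:i + m], i, i + m) for i in range(n - m + 1) if desc[i] >= m]
--     return out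
-- ===== Notes on version B (the rewrite author's own statement) =====
-- stated objective: faster
-- what changed: replaces the per-window rescan (slice + isdigit + inner digit-by-digit loop for each of the two directions) by one right-to-left pass that precomputes, for every position, the length of the maximal +1 and -1 digit runs starting there, so each window is then tested in O(1)
-- outside the precondition, e.g. on check_sequential_digits('566B', -2): A returns [('56', 0, -2)], B returns []
import Mathlib
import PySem

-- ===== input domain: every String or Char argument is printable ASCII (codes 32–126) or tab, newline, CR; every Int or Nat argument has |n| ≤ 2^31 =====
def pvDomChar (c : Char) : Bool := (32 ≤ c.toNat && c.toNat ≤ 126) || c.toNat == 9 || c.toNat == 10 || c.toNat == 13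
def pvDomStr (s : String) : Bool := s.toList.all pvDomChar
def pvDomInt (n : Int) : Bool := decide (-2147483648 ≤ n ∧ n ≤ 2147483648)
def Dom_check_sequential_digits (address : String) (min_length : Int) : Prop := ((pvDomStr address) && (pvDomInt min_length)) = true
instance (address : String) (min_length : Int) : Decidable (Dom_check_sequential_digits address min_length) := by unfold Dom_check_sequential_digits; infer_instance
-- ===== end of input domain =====

-- B replaces A's per-window rescans by one right-to-left run-length precomputation, making each window test O(1).

-- ===== PORT A =====
-- int(segment[j]) : reached only under the segment.isdigit() guard, where every char is an
-- ASCII digit, so 'toNat - 48' is exact there.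
def pvIntChar (c : Char) : Int := (c.toNat : Int) - 48

-- A's inner "for j in range(1, len(segment)): if int(seg[j]) != int(seg[j-1]) + delta: break"
-- flag loop, as the obvious structural recursion over adjacent pairs of the segment.
def pvChainA (delta : Int) : List Char → Bool
  | c1 :: c2 :: rest =>
      if pvIntChar c2 ≠ pvIntChar c1 + delta then false else pvChainA delta (c2 :: rest)
  | _ => true

def check_sequential_digits (address : String) (min_length : Int) : List (String × Int × Int) :=
  let s := address.toList
  let n : Int := PySem.Str.len address
  let res1 := (PySem.List.pyRange 0 (n - min_length + 1) 1).foldl (fun acc i =>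
    let seg := PySem.List.slice s (some i) (some (i + min_length))
    if PySem.Chars.strIsdigit seg then
      if pvChainA 1 seg then acc ++ [(String.ofList seg, i, i + min_length)] else acc
    else acc) []
  (PySem.List.pyRange 0 (n - min_length + 1) 1).foldl (fun acc i =>
    let seg := PySem.List.slice s (some i) (some (i + min_length))
    if PySem.Chars.strIsdigit seg then
      if pvChainA (-1) seg then acc ++ [(String.ofList seg, i, i + min_length)] else acc
    else acc) res1

-- ===== PORT B =====
-- B's right-to-left pass filling asc[i]/desc[i] (run lengths of the +1 / -1 digit chains
-- starting at i), as structural recursion building the list of pairs back to front.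
def pvRuns : List Char → List (Nat × Nat)
  | [] => []
  | c :: t =>
      let r := pvRuns t
      (if PySem.Chars.isdigit c then
         match t, r with
         | c' :: _, p :: _ =>
             if PySem.Chars.isdigit c' then
               let diff : Int := (c'.toNat : Int) - (c.toNat : Int)
               ((if diff = 1 then p.1 + 1 else 1), (if diff = -1 then p.2 + 1 else 1))
             else (1, 1)
         | _, _ => (1, 1)
       else (0, 0)) :: r

def check_sequential_digits_alt (address : String) (min_length : Int) : List (String × Int × Int) :=
  if min_length < 1 then [] else
  let s := address.toList
  let n := s.length
  let m := min_length.toNat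
  let rs := pvRuns s
  let mk : Nat → String × Int × Int :=
    fun i => (String.ofList ((s.drop i).take m), (i : Int), (i : Int) + min_length)
  ((List.range (n + 1 - m)).filterMap (fun i => if m ≤ (rs.getD i (0, 0)).1 then some (mk i) else none))
    ++ ((List.range (n + 1 - m)).filterMap (fun i => if m ≤ (rs.getD i (0, 0)).2 then some (mk i) else none))

-- ===== PRECONDITION & SPEC =====
-- Pre_ excludes negative min_length, on which A still returns: there Python's negative slice
-- end makes A scan windows of accidental length len(address)+min_length and report tuples
-- whose end index is negative — an artefact of slice
-- wraparound no caller could use; B naturally returns [] for a non-positive requested length.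
def Pre_check_sequential_digits (address : String) (min_length : Int) : Prop := 0 ≤ min_length
instance (address : String) (min_length : Int) : Decidable (Pre_check_sequential_digits address min_length) := by unfold Pre_check_sequential_digits; infer_instance

def pvWitness_check_sequential_digits : String × Int := ("1234509876", 5)

def Spec_check_sequential_digits (address : String) (min_length : Int) (out : List (String × Int × Int)) : Prop := out = check_sequential_digits_alt address min_length
instance (address : String) (min_length : Int) (out : List (String × Int × Int)) : Decidable (Spec_check_sequential_digits address min_length out) := by unfold Spec_check_sequential_digits; infer_instance

-- ===== CLAIM (what is proved, stated in full; the proofs are below) =====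
def Claim_equal_check_sequential_digits : Prop := ∀ (address : String) (min_length : Int), Dom_check_sequential_digits address min_length → Pre_check_sequential_digits address min_length → Spec_check_sequential_digits address min_length (check_sequential_digits address min_length)

-- ===== LEMMAS AND PROOFS =====

theorem strIsdigit_singleton (c : Char) :
    PySem.Chars.strIsdigit [c] = PySem.Chars.isdigit c := by
  simp [PySem.Chars.strIsdigit]

theorem strIsdigit_cons_cons (c x : Char) (xs : List Char) :
    PySem.Chars.strIsdigit (c :: x :: xs)
      = (PySem.Chars.isdigit c && PySem.Chars.strIsdigit (x :: xs)) := by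
  simp [PySem.Chars.strIsdigit]

theorem chainA_cons_cons (δ : Int) (c c' : Char) (rest : List Char) :
    pvChainA δ (c :: c' :: rest)
      = (decide (pvIntChar c' = pvIntChar c + δ) && pvChainA δ (c' :: rest)) := by
  by_cases h : pvIntChar c' = pvIntChar c + δ <;> simp [pvChainA, h]

theorem runsHead_nondigit (c : Char) (t : List Char) (hc : PySem.Chars.isdigit c = false) :
    (pvRuns (c :: t)).headD (0, 0) = (0, 0) := by
  simp [pvRuns, hc]

theorem runsHead_digit_nil (c : Char) (hc : PySem.Chars.isdigit c = true) :
    (pvRuns [c]).headD (0, 0) = (1, 1) := by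
  simp [pvRuns, hc]

theorem runsHead_cc (c c' : Char) (t : List Char) (hc : PySem.Chars.isdigit c = true)
    (hc' : PySem.Chars.isdigit c' = true) :
    (pvRuns (c :: c' :: t)).headD (0, 0)
      = ((if (c'.toNat : Int) - (c.toNat : Int) = 1 then ((pvRuns (c' :: t)).headD (0, 0)).1 + 1 else 1),
         (if (c'.toNat : Int) - (c.toNat : Int) = -1 then ((pvRuns (c' :: t)).headD (0, 0)).2 + 1 else 1)) := by
  conv_lhs => rw [pvRuns]
  simp [hc, hc', pvRuns]

theorem runsHead_cc_nd (c c' : Char) (t : List Char) (hc : PySem.Chars.isdigit c = true)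
    (hc' : PySem.Chars.isdigit c' = false) :
    (pvRuns (c :: c' :: t)).headD (0, 0) = (1, 1) := by
  conv_lhs => rw [pvRuns]
  simp [hc, hc', pvRuns]

theorem strIsdigit_cons_false (c : Char) (l : List Char)
    (hc : PySem.Chars.isdigit c = false) : PySem.Chars.strIsdigit (c :: l) = false := by
  simp [PySem.Chars.strIsdigit, hc]

theorem key_asc (t : List Char) (m : Nat) (h1 : 1 ≤ m) (h2 : m ≤ t.length) :
    (PySem.Chars.strIsdigit (t.take m) && pvChainA 1 (t.take m))
      = decide (m ≤ ((pvRuns t).headD (0, 0)).1) := by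
  induction t generalizing m with
  | nil => simp at h2; omega
  | cons c t' ih =>
      rw [Bool.eq_iff_iff, Bool.and_eq_true, decide_eq_true_iff]
      match m, h1 with
      | 1, _ =>
          simp only [List.take_succ_cons, List.take_zero, strIsdigit_singleton]
          by_cases hc : PySem.Chars.isdigit c
          · cases t' with
            | nil => rw [runsHead_digit_nil c hc]; simp [hc, pvChainA]
            | cons c' t'' =>
                by_cases hc' : PySem.Chars.isdigit c'
                · rw [runsHead_cc c c' t'' hc hc']
                  simp only [hc, pvChainA, and_true]
                  split <;> simp
                · rw [runsHead_cc_nd c c' t'' hc (by simp [hc'])]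
                  simp [hc, pvChainA]
          · rw [runsHead_nondigit c t' (by simp [hc])]
            simp [hc]
      | (mm+2), _ =>
          cases t' with
          | nil => simp at h2
          | cons c' t'' =>
              have hlen : mm + 1 ≤ (c' :: t'').length := by
                simpa using Nat.le_of_succ_le_succ h2
              have ihh := ih (mm + 1) (by omega) hlen
              rw [Bool.eq_iff_iff, Bool.and_eq_true, decide_eq_true_iff] at ihh
              simp only [List.take_succ_cons, strIsdigit_cons_cons, chainA_cons_cons,
                Bool.and_eq_true, decide_eq_true_iff]
              by_cases hc : PySem.Chars.isdigit c
              · by_cases hc' : PySem.Chars.isdigit c'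
                · by_cases hd : (c'.toNat : Int) - (c.toNat : Int) = 1
                  · rw [runsHead_cc c c' t'' hc hc']
                    have hchain : pvIntChar c' = pvIntChar c + 1 := by unfold pvIntChar; omega
                    simp only [hd, if_true, hc, hchain, true_and]
                    constructor
                    · rintro ⟨hs, hch⟩
                      have h3 := ihh.mp ⟨hs, hch⟩
                      omega
                    · intro hle
                      exact ihh.mpr (by omega)
                  · rw [runsHead_cc c c' t'' hc hc']
                    have hchain : ¬ (pvIntChar c' = pvIntChar c + 1) := by unfold pvIntChar; omega
                    simp [hd, hchain]
                · rw [runsHead_cc_nd c c' t'' hc (by simp [hc'])]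
                  have hf2 : PySem.Chars.strIsdigit (c' :: List.take mm t'') = false :=
                    strIsdigit_cons_false c' _ (by simp [hc'])
                  simp [hf2]
              · rw [runsHead_nondigit c (c' :: t'') (by simp [hc])]
                simp [hc]

theorem key_desc (t : List Char) (m : Nat) (h1 : 1 ≤ m) (h2 : m ≤ t.length) :
    (PySem.Chars.strIsdigit (t.take m) && pvChainA (-1) (t.take m))
      = decide (m ≤ ((pvRuns t).headD (0, 0)).2) := by
  induction t generalizing m with
  | nil => simp at h2; omega
  | cons c t' ih =>
      rw [Bool.eq_iff_iff, Bool.and_eq_true, decide_eq_true_iff]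
      match m, h1 with
      | 1, _ =>
          simp only [List.take_succ_cons, List.take_zero, strIsdigit_singleton]
          by_cases hc : PySem.Chars.isdigit c
          · cases t' with
            | nil => rw [runsHead_digit_nil c hc]; simp [hc, pvChainA]
            | cons c' t'' =>
                by_cases hc' : PySem.Chars.isdigit c'
                · rw [runsHead_cc c c' t'' hc hc']
                  simp only [hc, pvChainA, and_true]
                  split <;> simp
                · rw [runsHead_cc_nd c c' t'' hc (by simp [hc'])]
                  simp [hc, pvChainA]
          · rw [runsHead_nondigit c t' (by simp [hc])]
            simp [hc]
      | (mm+2), _ =>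
          cases t' with
          | nil => simp at h2
          | cons c' t'' =>
              have hlen : mm + 1 ≤ (c' :: t'').length := by
                simpa using Nat.le_of_succ_le_succ h2
              have ihh := ih (mm + 1) (by omega) hlen
              rw [Bool.eq_iff_iff, Bool.and_eq_true, decide_eq_true_iff] at ihh
              simp only [List.take_succ_cons, strIsdigit_cons_cons, chainA_cons_cons,
                Bool.and_eq_true, decide_eq_true_iff]
              by_cases hc : PySem.Chars.isdigit c
              · by_cases hc' : PySem.Chars.isdigit c'
                · by_cases hd : (c'.toNat : Int) - (c.toNat : Int) = -1
                  · rw [runsHead_cc c c' t'' hc hc']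
                    have hchain : pvIntChar c' = pvIntChar c + (-1) := by unfold pvIntChar; omega
                    have hd1 : ¬ ((c'.toNat : Int) - (c.toNat : Int) = 1) := by omega
                    simp only [hd, if_true, hc, hchain, true_and]
                    constructor
                    · rintro ⟨hs, hch⟩
                      have h3 := ihh.mp ⟨hs, hch⟩
                      omega
                    · intro hle
                      exact ihh.mpr (by omega)
                  · rw [runsHead_cc c c' t'' hc hc']
                    have hchain : ¬ (pvIntChar c' = pvIntChar c + (-1)) := by unfold pvIntChar; omega
                    simp [hd, hchain]
                · rw [runsHead_cc_nd c c' t'' hc (by simp [hc'])]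
                  have hf2 : PySem.Chars.strIsdigit (c' :: List.take mm t'') = false :=
                    strIsdigit_cons_false c' _ (by simp [hc'])
                  simp [hf2]
              · rw [runsHead_nondigit c (c' :: t'') (by simp [hc])]
                simp [hc]

theorem if_if_merge {α : Type} (P Q : Bool) (acc : List α) (x : α) :
    (if P then (if Q then acc ++ [x] else acc) else acc)
      = (if P && Q then acc ++ [x] else acc) := by
  cases P <;> cases Q <;> simp

theorem passA_eq (s : List Char) (mn : Nat) (δ : Int) (acc : List (String × Int × Int)) :
    ((PySem.List.pyRange 0 ((s.length : Int) - (mn : Int) + 1) 1).foldl (fun acc i =>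
      if PySem.Chars.strIsdigit (PySem.List.slice s (some i) (some (i + (mn : Int)))) then
        if pvChainA δ (PySem.List.slice s (some i) (some (i + (mn : Int)))) then
          acc ++ [(String.ofList (PySem.List.slice s (some i) (some (i + (mn : Int)))), i, i + (mn : Int))]
        else acc
      else acc) acc)
    = acc ++ (((List.range (((s.length : Int) - (mn : Int) + 1).toNat)).filter
        (fun k => PySem.Chars.strIsdigit ((s.drop k).take mn) && pvChainA δ ((s.drop k).take mn))).map
        (fun k => (String.ofList ((s.drop k).take mn), (k : Int), (k : Int) + (mn : Int)))) := by
  rw [PySem.List.pyRange_one]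
  simp only [zero_add, sub_zero, if_if_merge]
  rw [PySem.List.foldl_append_if]
  simp [List.filter_map, List.map_map, Function.comp_def, PySem.List.slice_natCast_add]

theorem pvRuns_drop (s : List Char) (k : Nat) : pvRuns (s.drop k) = (pvRuns s).drop k := by
  induction s generalizing k with
  | nil => simp [pvRuns]
  | cons c t ih =>
      cases k with
      | zero => rfl
      | succ j => simpa [pvRuns] using ih j

theorem getD_eq_headD_drop {α : Type} (l : List α) (k : Nat) (d : α) :
    l.getD k d = (l.drop k).headD d := by
  induction l generalizing k with
  | nil => simp
  | cons a t ih => cases k with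
    | zero => simp
    | succ j => simpa using ih j

theorem filterMap_ite {α β : Type} (p : α → Prop) [DecidablePred p] (f : α → β) (l : List α) :
    l.filterMap (fun x => if p x then some (f x) else none)
      = (l.filter (fun x => decide (p x))).map f := by
  induction l with
  | nil => rfl
  | cons a t ih => by_cases h : p a <;> simp [h, ih]

theorem main_eq (address : String) (min_length : Int) (hpre : 0 ≤ min_length) :
    check_sequential_digits address min_length = check_sequential_digits_alt address min_length := by
  obtain ⟨mn, rfl⟩ : ∃ mn : Nat, min_length = (mn : Int) :=
    ⟨min_length.toNat, (Int.toNat_of_nonneg hpre).symm⟩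
  simp only [check_sequential_digits, check_sequential_digits_alt, PySem.Str.len_eq]
  set s := address.toList with hs
  rw [passA_eq, passA_eq]
  by_cases h0 : mn = 0
  · subst h0
    simp [PySem.Chars.strIsdigit]
  · have h1 : 1 ≤ mn := Nat.one_le_iff_ne_zero.mpr h0
    rw [if_neg (by exact_mod_cast Nat.not_lt.mpr h1 : ¬ ((mn : Int) < 1))]
    rw [filterMap_ite, filterMap_ite]
    have hK : (((s.length : Int) - (mn : Int) + 1)).toNat = s.length + 1 - mn := by omega
    rw [hK]
    simp only [Int.toNat_natCast]
    have hfa : ∀ k ∈ List.range (s.length + 1 - mn),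
        (PySem.Chars.strIsdigit ((s.drop k).take mn) && pvChainA 1 ((s.drop k).take mn))
          = decide (mn ≤ ((pvRuns s).getD k (0, 0)).1) := by
      intro k hk
      rw [List.mem_range] at hk
      rw [getD_eq_headD_drop, ← pvRuns_drop]
      exact key_asc (s.drop k) mn h1 (by simp; omega)
    have hfd : ∀ k ∈ List.range (s.length + 1 - mn),
        (PySem.Chars.strIsdigit ((s.drop k).take mn) && pvChainA (-1) ((s.drop k).take mn))
          = decide (mn ≤ ((pvRuns s).getD k (0, 0)).2) := by
      intro k hk
      rw [List.mem_range] at hk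
      rw [getD_eq_headD_drop, ← pvRuns_drop]
      exact key_desc (s.drop k) mn h1 (by simp; omega)
    rw [List.filter_congr hfa, List.filter_congr hfd]
    simp

-- ===== VERDICT (by name: the statement is the Claim_ definition above) =====
theorem check_sequential_digits_spec : Claim_equal_check_sequential_digits := by
  intro address min_length _hdom hpre
  unfold Spec_check_sequential_digits
  exact main_eq address min_length hpre
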